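-- pv_equiv track=rewrite | github.com/MargotBoyer/FastSDPCertification | src/tools/utils.py | deduplicate_and_sum
-- ===== SOURCE A (Python) =====
-- def deduplicate_and_sum(I_list, L_list, num_matrix_list, values_list):
--     """
--     Detect doublons (i,l) in I x L, adds corresponding values,
--     and returns deduplicated lists I_dedupe, L_dedupe, values_summed.
--
--     Args:
--         I_list : List of indices i
--         L_list : List of indices l
--         num_matrix_list: List of matrix numbers
--         values_list: List of values associated with (i,l, num_matrix)
--
--     Returns:
--         tuple: (I_dedupe, L_dedupe, values_summed)
--     """
--     if (
--         len(I_list) != len(L_list)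
--         or len(I_list) != len(values_list)
--         or len(num_matrix_list) != len(I_list)
--         or len(num_matrix_list) != len(L_list)
--         or len(num_matrix_list) != len(values_list)
--         or len(L_list) != len(values_list)
--     ):
--         raise ValueError("Les trois listes doivent avoir la même taille")
--
--     couple_sums = {}
--     for idx in range(len(I_list)):
--         couple = (I_list[idx], L_list[idx], num_matrix_list[idx])
--
--         if couple in couple_sums.keys():
--             couple_sums[couple] += values_list[idx]
--         else:
--             couple_sums[couple] = values_list[idx]
--
--     I_dedupe = []
--     L_dedupe = []
--     num_matrix_dedupe = []
--     values_summed = []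
--
--     for (i_val, l_val, num_matrix_val), sum_val in couple_sums.items():
--         I_dedupe.append(i_val)
--         L_dedupe.append(l_val)
--         num_matrix_dedupe.append(num_matrix_val)
--         values_summed.append(sum_val)
--
--     return I_dedupe, L_dedupe, num_matrix_dedupe, values_summed
-- ===== SOURCE B (Python) =====
-- def deduplicate_and_sum(I_list, L_list, num_matrix_list, values_list):
--     """Dict-free deduplication: peel the pair list from the front, keep a key at its first
--     occurrence and compute its total by summing the matching values in the remaining suffix."""
--     if (
--         len(I_list) != len(L_list)
--         or len(I_list) != len(values_list)
--         or len(num_matrix_list) != len(I_list)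
--         or len(num_matrix_list) != len(L_list)
--         or len(num_matrix_list) != len(values_list)
--         or len(L_list) != len(values_list)
--     ):
--         raise ValueError("Les trois listes doivent avoir la même taille")
--
--     pairs = list(zip(zip(I_list, L_list, num_matrix_list), values_list))
--     I_dedupe, L_dedupe, num_matrix_dedupe, values_summed = [], [], [], []
--     seen = []
--     suffix = pairs
--     while suffix:
--         (key, v), suffix = suffix[0], suffix[1:]
--         if key not in seen:
--             seen.append(key)
--             I_dedupe.append(key[0])
--             L_dedupe.append(key[1])
--             num_matrix_dedupe.append(key[2])
--             values_summed.append(v + sum(v2 for k2, v2 in suffix if k2 == key))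
--     return I_dedupe, L_dedupe, num_matrix_dedupe, values_summed
-- ===== Notes on version B (the rewrite author's own statement) =====
-- stated objective: alternative
-- what changed: Replaces the hash-map aggregation (dict of sums plus a second unpacking loop) with a dict-free order-preserving scan: the pair list is peeled from the front, a key is emitted at its first occurrence (detected via a seen list) and its total is computed by summing the matching values in the remaining suffix.
import Mathlib
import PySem

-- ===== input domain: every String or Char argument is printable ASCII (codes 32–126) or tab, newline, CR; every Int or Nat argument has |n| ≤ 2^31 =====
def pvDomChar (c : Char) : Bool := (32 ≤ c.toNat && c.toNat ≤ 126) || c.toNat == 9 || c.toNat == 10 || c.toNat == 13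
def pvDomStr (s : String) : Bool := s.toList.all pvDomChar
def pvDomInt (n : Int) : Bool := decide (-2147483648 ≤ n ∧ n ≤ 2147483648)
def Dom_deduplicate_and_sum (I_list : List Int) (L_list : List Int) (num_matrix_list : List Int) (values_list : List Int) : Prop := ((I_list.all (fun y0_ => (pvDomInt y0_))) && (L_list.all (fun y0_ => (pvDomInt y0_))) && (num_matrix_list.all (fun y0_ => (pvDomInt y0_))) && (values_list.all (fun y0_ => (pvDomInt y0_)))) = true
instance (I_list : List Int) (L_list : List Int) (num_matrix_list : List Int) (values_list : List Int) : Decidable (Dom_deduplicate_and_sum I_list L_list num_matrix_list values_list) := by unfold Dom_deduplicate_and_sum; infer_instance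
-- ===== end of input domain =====

-- B replaces A's hash-map aggregation by a dict-free order-preserving scan: it peels the
-- zipped pair list from the front, emits a key at its first occurrence (membership in a
-- seen list) and computes its total by summing the matching values in the remaining suffix
-- (objective: alternative; quadratic instead of A's hashed linear pass).

-- ===== PORT A =====
-- Loop body of A's first loop: couple = (i, l, m); add v into couple_sums.
def pvStepA (d : PySem.Dict (Int × Int × Int) Int) (couple : Int × Int × Int) (v : Int) : PySem.Dict (Int × Int × Int) Int :=
  if d.contains couple then d.insert couple (d.getD couple 0 + v)
  else d.insert couple v

-- On length mismatch the Python raises ValueError; those inputs are excluded by Pre_ below.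
def deduplicate_and_sum (I_list : List Int) (L_list : List Int) (num_matrix_list : List Int) (values_list : List Int) : List Int × List Int × List Int × List Int :=
  let couple_sums :=
    (PySem.List.pyRange 0 (I_list.length : Int) 1).foldl
      (fun d idx =>
        pvStepA d (PySem.List.pyGetD I_list idx 0, PySem.List.pyGetD L_list idx 0,
          PySem.List.pyGetD num_matrix_list idx 0) (PySem.List.pyGetD values_list idx 0))
      PySem.Dict.empty
  couple_sums.items.foldl
    (fun acc p => (acc.1 ++ [p.1.1], acc.2.1 ++ [p.1.2.1], acc.2.2.1 ++ [p.1.2.2], acc.2.2.2 ++ [p.2]))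
    ([], [], [], [])

-- ===== PORT B =====
-- sum(v2 for k2, v2 in suffix if k2 == key)
def pvSsum (ps : List ((Int × Int × Int) × Int)) (key : Int × Int × Int) : Int :=
  ((ps.filter (fun p => p.1 == key)).map (fun p => p.2)).sum

-- B's while loop: peel the suffix from the front, state = (seen, four output lists).
def pvGoB (suffix : List ((Int × Int × Int) × Int)) (seen : List (Int × Int × Int))
    (acc : List Int × List Int × List Int × List Int) : List Int × List Int × List Int × List Int :=
  match suffix with
  | [] => acc
  | (key, v) :: rest =>
    if seen.contains key then pvGoB rest seen acc
    else pvGoB rest (seen ++ [key])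
      (acc.1 ++ [key.1], acc.2.1 ++ [key.2.1], acc.2.2.1 ++ [key.2.2], acc.2.2.2 ++ [v + pvSsum rest key])

-- Same length check as A (B raises the same ValueError; excluded by Pre_).
def deduplicate_and_sum_alt (I_list : List Int) (L_list : List Int) (num_matrix_list : List Int) (values_list : List Int) : List Int × List Int × List Int × List Int :=
  let pairs := (I_list.zip (L_list.zip num_matrix_list)).zip values_list
  pvGoB pairs [] ([], [], [], [])

-- ===== PRECONDITION & SPEC =====
-- Pre_ excludes exactly the inputs where both Pythons raise ValueError: unequal list lengths.
def Pre_deduplicate_and_sum (I_list : List Int) (L_list : List Int) (num_matrix_list : List Int) (values_list : List Int) : Prop :=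
  L_list.length = I_list.length ∧ num_matrix_list.length = I_list.length ∧ values_list.length = I_list.length
instance (I_list : List Int) (L_list : List Int) (num_matrix_list : List Int) (values_list : List Int) : Decidable (Pre_deduplicate_and_sum I_list L_list num_matrix_list values_list) := by unfold Pre_deduplicate_and_sum; infer_instance
def pvWitness_deduplicate_and_sum : List Int × List Int × List Int × List Int := ([1, 1, 2], [5, 5, 6], [0, 0, 1], [10, 20, 30])
def Spec_deduplicate_and_sum (I_list : List Int) (L_list : List Int) (num_matrix_list : List Int) (values_list : List Int) (out : List Int × List Int × List Int × List Int) : Prop := out = deduplicate_and_sum_alt I_list L_list num_matrix_list values_list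
instance (I_list : List Int) (L_list : List Int) (num_matrix_list : List Int) (values_list : List Int) (out : List Int × List Int × List Int × List Int) : Decidable (Spec_deduplicate_and_sum I_list L_list num_matrix_list values_list out) := by unfold Spec_deduplicate_and_sum; infer_instance

-- ===== CLAIM (what is proved, stated in full; the proofs are below) =====
def Claim_equal_deduplicate_and_sum : Prop := ∀ (I_list : List Int) (L_list : List Int) (num_matrix_list : List Int) (values_list : List Int), Dom_deduplicate_and_sum I_list L_list num_matrix_list values_list → Pre_deduplicate_and_sum I_list L_list num_matrix_list values_list → Spec_deduplicate_and_sum I_list L_list num_matrix_list values_list (deduplicate_and_sum I_list L_list num_matrix_list values_list)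

-- ===== LEMMAS AND PROOFS =====

-- The common specification: deduplicated (key, total) items in first-occurrence order.
def pvNewItems (seen : List (Int × Int × Int)) : List ((Int × Int × Int) × Int) → List ((Int × Int × Int) × Int)
  | [] => []
  | (k, v) :: ps =>
    if seen.contains k then pvNewItems seen ps
    else (k, v + pvSsum ps k) :: pvNewItems (seen ++ [k]) ps

lemma pvSsum_nil (k : Int × Int × Int) : pvSsum [] k = 0 := rfl

lemma pvSsum_cons_self (k : Int × Int × Int) (v : Int) (ps : List ((Int × Int × Int) × Int)) :
    pvSsum ((k, v) :: ps) k = v + pvSsum ps k := by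
  simp [pvSsum]

lemma pvSsum_cons_ne (k k' : Int × Int × Int) (v : Int) (ps : List ((Int × Int × Int) × Int))
    (h : k' ≠ k) : pvSsum ((k, v) :: ps) k' = pvSsum ps k' := by
  simp [pvSsum, (by simpa using Ne.symm h : ¬ k = k')]

-- B's loop appends the four component maps of pvNewItems to its accumulator.
lemma pv_goB_eq : ∀ (ps : List ((Int × Int × Int) × Int)) (seen : List (Int × Int × Int))
    (acc : List Int × List Int × List Int × List Int),
    pvGoB ps seen acc
      = (acc.1 ++ (pvNewItems seen ps).map (fun p => p.1.1),
         acc.2.1 ++ (pvNewItems seen ps).map (fun p => p.1.2.1),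
         acc.2.2.1 ++ (pvNewItems seen ps).map (fun p => p.1.2.2),
         acc.2.2.2 ++ (pvNewItems seen ps).map (fun p => p.2)) := by
  intro ps
  induction ps with
  | nil => intro seen acc; simp [pvGoB, pvNewItems]
  | cons p ps ih =>
    intro seen acc
    obtain ⟨k, v⟩ := p
    by_cases h : k ∈ seen
    · simp [pvGoB, pvNewItems, h, ih]
    · simp [pvGoB, pvNewItems, h, ih]

-- A's second loop: appending four components is the four projections mapped.
lemma pv_foldl_app4 (items : List ((Int × Int × Int) × Int)) :
    ∀ acc : List Int × List Int × List Int × List Int,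
    items.foldl (fun acc p => (acc.1 ++ [p.1.1], acc.2.1 ++ [p.1.2.1], acc.2.2.1 ++ [p.1.2.2], acc.2.2.2 ++ [p.2])) acc
      = (acc.1 ++ items.map (fun p => p.1.1), acc.2.1 ++ items.map (fun p => p.1.2.1),
         acc.2.2.1 ++ items.map (fun p => p.1.2.2), acc.2.2.2 ++ items.map (fun p => p.2)) := by
  induction items with
  | nil => intro acc; simp
  | cons p t ih => intro acc; simp [List.foldl_cons, ih]

-- A's index loop over four equal-length lists is a fold over their zip.
lemma pv_foldl_range_read4 {σ : Type} (g : σ → Int → Int → Int → Int → σ) :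
    ∀ (I L M V : List Int) (st : σ), L.length = I.length → M.length = I.length → V.length = I.length →
    (List.range I.length).foldl (fun st i => g st (I.getD i 0) (L.getD i 0) (M.getD i 0) (V.getD i 0)) st
      = (I.zip (L.zip (M.zip V))).foldl (fun st p => g st p.1 p.2.1 p.2.2.1 p.2.2.2) st := by
  intro I
  induction I with
  | nil => intros; simp
  | cons a I ih =>
    intro L M V st hL hM hV
    cases L with
    | nil => simp at hL
    | cons b L =>
      cases M with
      | nil => simp at hM
      | cons c M =>
        cases V with
        | nil => simp at hV
        | cons v V =>
          simp only [List.length_cons, List.range_succ_eq_map, List.foldl_cons, List.foldl_map,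
            List.getD_cons_succ, List.getD_cons_zero, List.zip_cons_cons]
          exact ih L M V _ (by simpa using hL) (by simpa using hM) (by simpa using hV)

-- Reassociating the four-way zip into (key, value) pairs.
lemma pv_zip4_pairs : ∀ (I L M V : List Int), L.length = I.length → M.length = I.length → V.length = I.length →
    (I.zip (L.zip (M.zip V))).map (fun p => ((p.1, p.2.1, p.2.2.1), p.2.2.2))
      = (I.zip (L.zip M)).zip V := by
  intro I
  induction I with
  | nil => intros; simp
  | cons a I ih =>
    intro L M V hL hM hV
    cases L with
    | nil => simp at hL
    | cons b L =>
      cases M with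
      | nil => simp at hM
      | cons c M =>
        cases V with
        | nil => simp at hV
        | cons v V =>
          simp only [List.zip_cons_cons, List.map_cons]
          rw [ih L M V (by simpa using hL) (by simpa using hM) (by simpa using hV)]

-- A's aggregation loop, characterised: existing keys gain the suffix sums, fresh keys append.
lemma pv_items_agg : ∀ (ps : List ((Int × Int × Int) × Int)) (d : PySem.Dict (Int × Int × Int) Int),
    d.keys.Nodup →
    (ps.foldl (fun d p => pvStepA d p.1 p.2) d).items
      = d.items.map (fun q => (q.1, q.2 + pvSsum ps q.1)) ++ pvNewItems d.keys ps := by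
  intro ps
  induction ps with
  | nil =>
    intro d _
    simp [pvNewItems, pvSsum_nil]
  | cons p ps ih =>
    intro d hnd
    obtain ⟨k, v⟩ := p
    by_cases h : d.contains k = true
    · -- existing key
      have hk : k ∈ d.keys := (PySem.Dict.contains_iff_mem_keys d k).mp h
      have hstep : pvStepA d k v = d.insert k (d.getD k 0 + v) := by
        simp [pvStepA, h]
      have hkeys : (d.insert k (d.getD k 0 + v)).keys = d.keys :=
        PySem.Dict.keys_insert_of_contains d (d.getD k 0 + v) h
      have hnd' : (d.insert k (d.getD k 0 + v)).keys.Nodup := hkeys ▸ hnd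
      simp only [List.foldl_cons, hstep]
      rw [ih _ hnd', hkeys,
        PySem.Dict.items_insert_of_contains d _ h, List.map_map]
      have hseen : d.keys.contains k = true := List.contains_iff_mem.mpr hk
      have hmapeq : d.items.map ((fun q => (q.1, q.2 + pvSsum ps q.1)) ∘
            (fun p => if p.1 == k then (k, d.getD k 0 + v) else p))
          = d.items.map (fun q => (q.1, q.2 + pvSsum ((k, v) :: ps) q.1)) := by
        apply List.map_congr_left
        intro q hq
        by_cases hqk : q.1 = k
        · have hgd : d.getD k 0 = q.2 := by
            have : (q.1, q.2) ∈ d.items := by simpa using hq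
            have := PySem.Dict.getD_of_mem_items d this hnd (d0 := 0)
            rw [hqk] at this
            exact this
          simp only [Function.comp, hqk, beq_self_eq_true, if_pos, hgd, pvSsum_cons_self]
          rw [add_assoc]
        · simp only [Function.comp, (by simpa using hqk : ¬ (q.1 == k) = true), if_neg,
            Bool.false_eq_true, not_false_iff, pvSsum_cons_ne k q.1 v ps hqk]
      rw [hmapeq]
      simp only [pvNewItems, hseen, if_pos]
    · -- fresh key
      have hstep : pvStepA d k v = d.insert k v := by
        simp [pvStepA, h]
      have hcf : d.contains k = false := by simpa using h
      have hkeys : (d.insert k v).keys = d.keys ++ [k] :=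
        PySem.Dict.keys_insert_of_not_contains d v hcf
      have hknot : k ∉ d.keys := fun hm => h ((PySem.Dict.contains_iff_mem_keys d k).mpr hm)
      have hnd' : (d.insert k v).keys.Nodup := by
        rw [hkeys]
        exact List.Nodup.append hnd (List.nodup_singleton k) (by simpa using hknot)
      simp only [List.foldl_cons, hstep]
      rw [ih _ hnd', hkeys, PySem.Dict.items_insert_of_not_contains d _ hcf]
      have hseen : d.keys.contains k = false := by
        simpa using hknot
      have hmapeq : d.items.map (fun q => (q.1, q.2 + pvSsum ps q.1))
          = d.items.map (fun q => (q.1, q.2 + pvSsum ((k, v) :: ps) q.1)) := by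
        apply List.map_congr_left
        intro q hq
        have hqk : q.1 ≠ k := by
          intro hh
          exact hknot (hh ▸ (by
            have : q.1 ∈ d.items.map Prod.fst := List.mem_map_of_mem hq
            simpa [PySem.Dict.keys] using this))
        rw [pvSsum_cons_ne k q.1 v ps hqk]
      simp only [List.map_append, List.map_cons, List.map_nil, pvNewItems, hseen,
        Bool.false_eq_true, if_neg, not_false_iff]
      rw [← hmapeq]
      simp

-- ===== VERDICT (by name: the statement is the Claim_ definition above) =====
theorem deduplicate_and_sum_spec : Claim_equal_deduplicate_and_sum := by
  intro I L M V _ hPre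
  obtain ⟨hL, hM, hV⟩ := hPre
  show deduplicate_and_sum I L M V = deduplicate_and_sum_alt I L M V
  have hAfold : (PySem.List.pyRange 0 (I.length : Int) 1).foldl
      (fun d idx =>
        pvStepA d (PySem.List.pyGetD I idx 0, PySem.List.pyGetD L idx 0,
          PySem.List.pyGetD M idx 0) (PySem.List.pyGetD V idx 0)) PySem.Dict.empty
      = ((I.zip (L.zip M)).zip V).foldl (fun d p => pvStepA d p.1 p.2) PySem.Dict.empty := by
    rw [PySem.List.pyRange_zero_natCast, List.foldl_map]
    simp only [PySem.List.pyGetD_natCast]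
    rw [pv_foldl_range_read4 (fun d i l m v => pvStepA d (i, l, m) v) I L M V _ hL hM hV,
      ← pv_zip4_pairs I L M V hL hM hV, List.foldl_map]
  have hitems := pv_items_agg ((I.zip (L.zip M)).zip V) PySem.Dict.empty (by
    rw [(rfl : (PySem.Dict.empty : PySem.Dict (Int × Int × Int) Int).keys = [])]
    exact List.nodup_nil)
  have hitems' : (List.foldl (fun d p => pvStepA d p.1 p.2) PySem.Dict.empty
      ((I.zip (L.zip M)).zip V)).items = pvNewItems [] ((I.zip (L.zip M)).zip V) := by
    rw [hitems]; rfl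
  simp only [deduplicate_and_sum, deduplicate_and_sum_alt]
  rw [hAfold, hitems', pv_foldl_app4, pv_goB_eq]
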